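-- pv_equiv track=rewrite | github.com/yskang/AlgorithmPractice | baekjoon/python/progammer_of_hios_16564.py | solution
-- ===== SOURCE A (Python) =====
-- def solution(n: int, k: int, levels: list):
--     start = 0
--     end = 1000000001
--     ans = -1
--     while True:
--         if end - start < 2:
--             break
--         sum_up = 0
--         min_level = start + (end - start)//2
--         for level in levels:
--             if level < min_level:
--                 sum_up += (min_level - level)
--
--         if sum_up <= k:
--             ans = min_level
--             start = min_level
--         elif sum_up > k:
--             end = min_level
--
--     return ans
-- ===== SOURCE B (Python) =====
-- def solution(n: int, k: int, levels: list):
--     # Sort ascending and scan the linear pieces of the cost function from the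
--     # top: with the c largest... (c lowest levels below the target) the cost of
--     # reaching level L is c*L - sum(lowest c levels), so the best affordable L
--     # of a piece is one floor division away.
--     CAP = 1000000000
--     v = sorted(levels)
--     pre = sum(v)
--     for c in range(len(v), 0, -1):
--         cand = (k + pre) // c          # largest L with c*L - pre <= k
--         if cand >= v[c - 1]:           # cand lies in this piece: global optimum
--             return min(cand, CAP) if cand >= 1 else -1
--         pre -= v[c - 1]
--     # no piece with a positive count is affordable; below the smallest level
--     # nothing needs raising, so the cost there is 0, affordable exactly if k >= 0
--     if k >= 0:
--         top = v[0] if v else CAP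
--         return min(top, CAP) if top >= 1 else -1
--     return -1
-- ===== Notes on version B (the rewrite author's own statement) =====
-- stated objective: faster
-- what changed: Replaced the binary search over the answer range (~30 full passes over the list) by sort + one descending sweep over the linear pieces of the cost function, finding the exact optimum of each piece with one floor division.
import Mathlib
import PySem

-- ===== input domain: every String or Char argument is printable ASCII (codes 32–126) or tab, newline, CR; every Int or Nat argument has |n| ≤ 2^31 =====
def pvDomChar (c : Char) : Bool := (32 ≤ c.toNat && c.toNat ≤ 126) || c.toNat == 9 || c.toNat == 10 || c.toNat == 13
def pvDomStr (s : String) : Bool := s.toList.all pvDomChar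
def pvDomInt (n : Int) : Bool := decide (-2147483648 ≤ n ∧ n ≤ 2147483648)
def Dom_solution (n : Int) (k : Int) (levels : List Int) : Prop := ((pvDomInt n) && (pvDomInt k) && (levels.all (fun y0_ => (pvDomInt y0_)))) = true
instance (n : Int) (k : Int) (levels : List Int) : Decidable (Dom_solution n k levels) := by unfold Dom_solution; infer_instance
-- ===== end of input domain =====

-- B replaces A's answer-space binary search (~30 passes over the list) by sort + one
-- descending sweep over the linear pieces of the cost function; same return value everywhere.

-- ===== PORT A =====
-- the while-True binary search of A, transliterated (start/end/ans state); the Nat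
-- argument is fuel that only makes the loop total — the interval shrinks by at least 1
-- per iteration, so the initial fuel (the interval length) is never exhausted
def bsLoop (k : Int) (levels : List Int) : Nat → Int → Int → Int → Int
  | 0, _, _, ans => ans
  | fuel + 1, start, e, ans =>
    if e - start < 2 then ans
    else
      let mid := start + PySem.Int.floordiv (e - start) 2
      if levels.foldl (fun acc t => if t < mid then acc + (mid - t) else acc) 0 ≤ k
      then bsLoop k levels fuel mid e mid
      else bsLoop k levels fuel start mid ans

def solution (n : Int) (k : Int) (levels : List Int) : Int :=
  bsLoop k levels 1000000001 0 1000000001 (-1)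

-- ===== PORT B =====
-- the 'for c in range(len(v), 0, -1)' loop of Source B, transliterated: walking c from
-- len(v) down to 1 while reading v[c-1] is recursion over the reversed sorted list,
-- carrying c and the running prefix sum pre (state: rest, c, pre)
def bGo (k CAP : Int) (v0 : List Int) : List Int → Int → Int → Int
  | [], _, _ =>
    if 0 ≤ k then
      let top := v0.headD CAP
      if 1 ≤ top then min top CAP else -1
    else -1
  | x :: rest, c, pre =>
    let cand := PySem.Int.floordiv (k + pre) c
    if x ≤ cand then (if 1 ≤ cand then min cand CAP else -1)
    else bGo k CAP v0 rest (c - 1) (pre - x)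

def solution_alt (n : Int) (k : Int) (levels : List Int) : Int :=
  let v := PySem.List.sorted levels (fun t => t) false
  bGo k 1000000000 v v.reverse (v.length : Int) v.sum

-- ===== PRECONDITION & SPEC =====
def Spec_solution (n : Int) (k : Int) (levels : List Int) (out : Int) : Prop := out = solution_alt n k levels
instance (n : Int) (k : Int) (levels : List Int) (out : Int) : Decidable (Spec_solution n k levels out) := by unfold Spec_solution; infer_instance

-- ===== CLAIM (what is proved, stated in full; the proofs are below) =====
def Claim_equal_solution : Prop := ∀ (n : Int) (k : Int) (levels : List Int), Dom_solution n k levels → Spec_solution n k levels (solution n k levels)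

-- ===== LEMMAS AND PROOFS =====

-- total upgrade cost to bring every level below L up to L
def fCost (xs : List Int) (L : Int) : Int :=
  (xs.map (fun t => if t < L then L - t else 0)).sum

-- "best is the maximal affordable level in [1, H] (or -1 if none)"
def BInv (f : Int → Int) (k H best : Int) : Prop :=
  (best = -1 ∧ ∀ L, 1 ≤ L → L ≤ H → k < f L) ∨
  (1 ≤ best ∧ best ≤ H ∧ f best ≤ k ∧ ∀ L, best < L → L ≤ H → k < f L)

lemma BInv_uniq {f : Int → Int} {k H r1 r2 : Int}
    (h1 : BInv f k H r1) (h2 : BInv f k H r2) : r1 = r2 := by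
  rcases h1 with ⟨e1, a1⟩ | ⟨b1, hH1, hf1, a1⟩ <;>
    rcases h2 with ⟨e2, a2⟩ | ⟨b2, hH2, hf2, a2⟩
  · omega
  · exact absurd (a1 r2 b2 hH2) (not_lt.2 hf2)
  · exact absurd (a2 r1 b1 hH1) (not_lt.2 hf1)
  · rcases lt_trichotomy r1 r2 with h | h | h
    · exact absurd (a1 r2 h hH2) (not_lt.2 hf2)
    · exact h
    · exact absurd (a2 r1 h hH1) (not_lt.2 hf1)

lemma foldl_cost (m : Int) : ∀ (xs : List Int) (a : Int),
    xs.foldl (fun acc t => if t < m then acc + (m - t) else acc) a = a + fCost xs m := by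
  intro xs
  induction xs with
  | nil => intro a; simp [fCost]
  | cons x xs ih =>
    intro a
    simp only [List.foldl_cons, fCost, List.map_cons, List.sum_cons]
    rw [ih]
    split <;> simp [fCost] <;> ring

lemma fCost_nonneg (xs : List Int) (L : Int) : 0 ≤ fCost xs L := by
  unfold fCost
  apply List.sum_nonneg
  intro y hy
  obtain ⟨t, _, rfl⟩ := List.mem_map.1 hy
  split_ifs <;> omega

lemma fCost_mono (xs : List Int) {L1 L2 : Int} (h : L1 ≤ L2) :
    fCost xs L1 ≤ fCost xs L2 := by
  unfold fCost
  apply List.sum_le_sum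
  intro t ht
  split_ifs <;> omega

lemma fCost_split (u w : List Int) (L : Int)
    (h1 : ∀ t ∈ u, t ≤ L) (h2 : ∀ t ∈ w, L ≤ t) :
    fCost (u ++ w) L = (u.length : Int) * L - u.sum := by
  have hw : (w.map (fun t => if t < L then L - t else 0)).sum = 0 := by
    induction w with
    | nil => simp
    | cons a w ihw =>
      have ha := h2 a (List.mem_cons_self)
      rw [List.map_cons, List.sum_cons, if_neg (by omega),
        ihw (fun t ht => h2 t (List.mem_cons_of_mem _ ht))]
      ring
  unfold fCost
  rw [List.map_append, List.sum_append, hw, add_zero]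
  induction u with
  | nil => simp
  | cons a u ihu =>
    have ha := h1 a (List.mem_cons_self)
    rw [List.map_cons, List.sum_cons, ihu (fun t ht => h1 t (List.mem_cons_of_mem _ ht))]
    have : ((a :: u).length : Int) = (u.length : Int) + 1 := by push_cast [List.length_cons]; ring
    rw [this, List.sum_cons]
    split_ifs <;> ring_nf <;> linarith [(by ring : ((u.length : Int) + 1) * L = (u.length : Int) * L + L)]

lemma bGo_ok (k CAP : Int) (hCAP : 1 ≤ CAP) (v : List Int) (hv : v.Pairwise (· ≤ ·)) :
    ∀ (ru w : List Int), v = ru.reverse ++ w →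
      (∀ L hd, w.head? = some hd → hd ≤ L → k < fCost v L) →
      BInv (fCost v) k CAP (bGo k CAP v ru (ru.length : Int) ru.sum) := by
  intro ru
  induction ru with
  | nil =>
    intro w hveq hinv
    simp only [List.reverse_nil, List.nil_append] at hveq
    subst hveq
    simp only [bGo, List.length_nil, List.sum_nil, Nat.cast_zero]
    split_ifs with hk htop
    · right
      refine ⟨le_min htop hCAP, min_le_right _ _, ?_, ?_⟩
      · have hz : fCost v (min (v.headD CAP) CAP) = 0 := by
          have hsplit := fCost_split [] v (min (v.headD CAP) CAP) (by simp) ?_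
          · simpa using hsplit
          · intro t ht
            cases v with
            | nil => simp at ht
            | cons hd tl =>
              rcases List.mem_cons.1 ht with rfl | h
              · exact min_le_left _ _
              · exact (min_le_left _ _).trans (List.rel_of_pairwise_cons hv h)
        rw [hz]; exact hk
      · intro L hL1 hL2
        cases v with
        | nil => simp at hL1; omega
        | cons hd tl =>
          refine hinv L hd rfl ?_
          simp only [List.headD_cons] at hL1
          rcases le_total hd CAP with h | h
          · rw [min_eq_left h] at hL1; omega
          · rw [min_eq_right h] at hL1; omega
    · left
      refine ⟨rfl, fun L h1 h2 => ?_⟩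
      cases v with
      | nil => simp at htop; omega
      | cons hd tl =>
        refine hinv L hd rfl ?_
        simp only [List.headD_cons] at htop; omega
    · left
      exact ⟨rfl, fun L h1 h2 => lt_of_lt_of_le (by omega) (fCost_nonneg v L)⟩
  | cons x ru' ih =>
    intro w hveq hinv
    have hveq' : v = ru'.reverse ++ (x :: w) := by
      rw [hveq]; simp [List.reverse_cons, List.append_assoc]
    have hvp : (ru'.reverse ++ x :: w).Pairwise (· ≤ ·) := hveq' ▸ hv
    have hpa := List.pairwise_append.1 hvp
    have hle_x : ∀ t ∈ ru'.reverse, t ≤ x := fun t ht => hpa.2.2 t ht x (List.mem_cons_self)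
    have hxw : ∀ t ∈ w, x ≤ t := fun t ht => List.rel_of_pairwise_cons hpa.2.1 ht
    have hwp : w.Pairwise (· ≤ ·) := hpa.2.1.of_cons
    have hc' : (((x :: ru').length : Nat) : Int) = (ru'.length : Int) + 1 := by
      push_cast [List.length_cons]; ring
    have hcpos : 0 < (((x :: ru').length : Nat) : Int) := by rw [hc']; positivity
    simp only [bGo]
    set c : Int := (((x :: ru').length : Nat) : Int) with hcdef
    set pre : Int := (x :: ru').sum with hpredef
    set cand : Int := PySem.Int.floordiv (k + pre) c with hcanddef
    have hform : ∀ L, x ≤ L → (∀ hd, w.head? = some hd → L ≤ hd) →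
        fCost v L = c * L - pre := by
      intro L hxL hHB
      have hv2 : v = (ru'.reverse ++ [x]) ++ w := by rw [hveq']; simp [List.append_assoc]
      rw [hv2, fCost_split (ru'.reverse ++ [x]) w L ?_ ?_]
      · simp only [List.length_append, List.length_reverse, List.sum_append,
          List.sum_reverse, List.length_cons, List.length_nil, List.sum_cons, List.sum_nil,
          hcdef, hpredef]
        push_cast [List.length_cons]
        ring
      · intro t ht
        rcases List.mem_append.1 ht with h | h
        · exact (hle_x t h).trans hxL
        · simp only [List.mem_singleton] at h; subst h; exact hxL
      · intro t ht
        cases w with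
        | nil => simp at ht
        | cons hd w' =>
          have hLhd := hHB hd rfl
          rcases List.mem_cons.1 ht with rfl | h
          · exact hLhd
          · exact hLhd.trans (List.rel_of_pairwise_cons hwp h)
    have hbr1 : cand * c ≤ k + pre := (PySem.Int.le_floordiv_iff_mul_le hcpos).1 le_rfl
    have hkey : ∀ L, x ≤ L → cand < L → k < fCost v L := by
      intro L hxL hcL
      have harith : ∀ hL : (∀ hd, w.head? = some hd → L ≤ hd), k < fCost v L := by
        intro hL
        rw [hform L hxL hL]
        have h2 : k + pre < L * c := (PySem.Int.floordiv_lt_iff_lt_mul hcpos).1 hcL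
        have hm : L * c = c * L := mul_comm _ _
        linarith
      cases w with
      | nil => exact harith (by intro hd h; simp at h)
      | cons hd w' =>
        by_cases hLhd : L ≤ hd
        · exact harith (by intro hd' h; simp only [List.head?_cons, Option.some.injEq] at h; omega)
        · exact hinv L hd rfl (by omega)
    split_ifs with hfire hone
    · -- x ≤ cand, 1 ≤ cand: result min cand CAP
      have hcle : ∀ hd, w.head? = some hd → cand ≤ hd := by
        intro hd h
        cases w with
        | nil => simp at h
        | cons hd0 w' =>
          simp only [List.head?_cons, Option.some.injEq] at h; subst h
          by_contra hlt
          push_neg at hlt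
          have hxhd : x ≤ hd0 := hxw hd0 (List.mem_cons_self)
          have hfhd : fCost v hd0 = c * hd0 - pre :=
            hform hd0 hxhd (by intro hd' hh; simp only [List.head?_cons, Option.some.injEq] at hh; omega)
          have hfle : fCost v hd0 ≤ k := by
            rw [hfhd]
            have : c * hd0 ≤ c * cand := by
              apply mul_le_mul_of_nonneg_left (by omega) (le_of_lt hcpos)
            have hm : cand * c = c * cand := mul_comm _ _
            linarith
          exact absurd (hinv hd0 hd0 rfl le_rfl) (not_lt.2 hfle)
      have hfc : fCost v cand ≤ k := by
        rw [hform cand hfire hcle]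
        have hm : cand * c = c * cand := mul_comm _ _
        linarith
      right
      refine ⟨le_min hone hCAP, min_le_right _ _, ?_, ?_⟩
      · exact le_trans (fCost_mono v (min_le_left _ _)) hfc
      · intro L hL1 hL2
        have hcL : cand < L := by
          rcases le_total cand CAP with h | h
          · rw [min_eq_left h] at hL1; omega
          · rw [min_eq_right h] at hL1; omega
        exact hkey L (le_trans hfire (le_of_lt hcL)) hcL
    · -- x ≤ cand, cand < 1: result -1
      left
      exact ⟨rfl, fun L h1 h2 => hkey L (by omega) (by omega)⟩
    · -- cand < x: recurse
      push_neg at hfire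
      have hrec := ih (x :: w) hveq' ?_
      · have hlen : (((x :: ru').length : Nat) : Int) - 1 = (ru'.length : Int) := by
          push_cast [List.length_cons]; ring
        have hsum : (x :: ru').sum - x = ru'.sum := by rw [List.sum_cons]; ring
        rw [hlen, hsum]
        exact hrec
      · intro L hd h hdL
        simp only [List.head?_cons, Option.some.injEq] at h
        subst h
        exact hkey L hdL (by omega)

lemma bsLoop_ok (k : Int) (levels : List Int) :
    ∀ (fuel : Nat) (start e ans : Int), (e - start).toNat ≤ fuel →
      0 ≤ start → start < e → e ≤ 1000000001 →
      (∀ L, e ≤ L → L ≤ 1000000000 → k < fCost levels L) →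
      ((start = 0 ∧ ans = -1) ∨ (1 ≤ start ∧ ans = start ∧ fCost levels start ≤ k)) →
      BInv (fCost levels) k 1000000000 (bsLoop k levels fuel start e ans) := by
  intro fuel
  induction fuel with
  | zero =>
    intro start e ans hfuel h0 hlt he hbig hst
    exact absurd hlt (by omega)
  | succ fuel ih =>
    intro start e ans hfuel h0 hlt he hbig hst
    simp only [bsLoop]
    split_ifs with hexit hle
    · have he1 : e = start + 1 := by omega
      rcases hst with ⟨hs0, ha⟩ | ⟨h1, ha, hf⟩
      · subst ha
        exact Or.inl ⟨rfl, fun L hL1 hL2 => hbig L (by omega) hL2⟩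
      · subst ha
        exact Or.inr ⟨h1, by omega, hf, fun L hL1 hL2 => hbig L (by omega) hL2⟩
    · have hmid : start < start + PySem.Int.floordiv (e - start) 2 ∧
          start + PySem.Int.floordiv (e - start) 2 < e := by
        rw [PySem.Int.floordiv_eq_ediv_of_pos (by norm_num : (0:Int) < 2)]
        omega
      rw [foldl_cost, zero_add] at hle
      exact ih _ _ _ (by omega) (by omega) (by omega) he hbig (Or.inr ⟨by omega, rfl, hle⟩)
    · have hmid : start < start + PySem.Int.floordiv (e - start) 2 ∧
          start + PySem.Int.floordiv (e - start) 2 < e := by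
        rw [PySem.Int.floordiv_eq_ediv_of_pos (by norm_num : (0:Int) < 2)]
        omega
      rw [foldl_cost, zero_add] at hle
      refine ih _ _ _ (by omega) h0 (by omega) (by omega) ?_ hst
      intro L hL1 hL2
      exact lt_of_lt_of_le (by omega) (fCost_mono levels hL1)

-- ===== VERDICT (by name: the statement is the Claim_ definition above) =====
theorem solution_spec : Claim_equal_solution := by
  intro n k levels _
  unfold Spec_solution solution solution_alt
  have hA : BInv (fCost levels) k 1000000000
      (bsLoop k levels 1000000001 0 1000000001 (-1)) := by
    refine bsLoop_ok k levels 1000000001 0 1000000001 (-1) (by norm_num) le_rfl (by norm_num)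
      le_rfl ?_ (Or.inl ⟨rfl, rfl⟩)
    intro L h1 h2; omega
  set v := PySem.List.sorted levels (fun t => t) false with hvdef
  have hperm : v.Perm levels := PySem.List.sorted_perm levels (fun t => t) false
  have hpair : v.Pairwise (· ≤ ·) := by
    have := PySem.List.sorted_pairwise (xs := levels) (key := fun t => t)
    simpa using this
  have hfeq : fCost v = fCost levels := by
    funext L
    exact (hperm.map _).sum_eq
  have hB := bGo_ok k 1000000000 (by norm_num) v hpair v.reverse []
      (by simp) (by intro L hd h; simp at h)
  simp only [List.length_reverse, List.sum_reverse] at hB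
  rw [hfeq] at hB
  exact BInv_uniq hA hB
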